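-- pv_equiv track=rewrite | github.com/MateanJagiz/Ploter | src/module/instruction.py | find_multiple_n_starts
-- ===== SOURCE A (Python) =====
-- def find_multiple_n_starts(seq):
--     indices_n_start = []
--     i = 0
--     while i < len(seq):
--         # Sprawdzamy czy to litera 'N'
--         if isinstance(seq[i], str) and seq[i] == 'N':
--             # Zliczamy wszystkie kolejne N
--             n_count = 1
--             j = i + 1
--             while j < len(seq) and isinstance(seq[j], str) and seq[j] == 'N':
--                 n_count += 1
--                 j += 1
--             # Jeśli 2 lub więcej N, dodajemy do wyniku
--             if n_count >= 2:
--                 indices_n_start.append((i, n_count))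
--             # Przeskakujemy całą sekwencję N
--             i = j
--         else:
--             i += 1
--
--     return indices_n_start
-- ===== SOURCE B (Python) =====
-- def find_multiple_n_starts(seq):
--     # Pass 1: positions of 'N' entries.
--     ns = [i for i, x in enumerate(seq) if isinstance(x, str) and x == 'N']
--     # Pass 2: group the position list into maximal runs of consecutive
--     # integers, built back-to-front (acc holds the runs in reverse order).
--     acc = []
--     for i in reversed(ns):
--         if acc and acc[-1][0] == i + 1:
--             acc[-1] = (i, acc[-1][1] + 1)
--         else:
--             acc.append((i, 1))
--     runs = acc[::-1]
--     # Pass 3: keep runs of length >= 2.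
--     return [(s, l) for s, l in runs if l >= 2]
-- ===== Notes on version B (the rewrite author's own statement) =====
-- stated objective: alternative
-- what changed: Instead of A's element-wise index walk with a nested counting loop, B first extracts the list of 'N' positions, then groups that integer list into maximal consecutive runs by a backward accumulator pass (merging a position into the run it precedes), and finally filters runs of length >= 2.
import Mathlib
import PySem

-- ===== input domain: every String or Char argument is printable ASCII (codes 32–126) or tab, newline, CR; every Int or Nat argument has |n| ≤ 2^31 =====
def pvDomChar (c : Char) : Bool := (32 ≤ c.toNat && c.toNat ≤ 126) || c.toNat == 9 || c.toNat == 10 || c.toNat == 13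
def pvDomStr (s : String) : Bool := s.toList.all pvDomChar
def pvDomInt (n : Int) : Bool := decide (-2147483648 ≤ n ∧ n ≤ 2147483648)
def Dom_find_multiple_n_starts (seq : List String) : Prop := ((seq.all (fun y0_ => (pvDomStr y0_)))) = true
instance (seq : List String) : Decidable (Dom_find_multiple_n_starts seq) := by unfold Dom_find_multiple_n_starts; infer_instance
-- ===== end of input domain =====

-- B replaces A's element-wise walk by three staged passes: extract 'N' positions,
-- group that integer list into consecutive runs back-to-front, filter runs ≥ 2 (alternative; same values).

-- ===== PORT A =====
-- inner while loop: counts consecutive "N" from index j (isinstance(·, str) is always true for List String)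
def pvInnerA (seq : List String) (n_count : Int) (j : Nat) : Int × Nat :=
  if h : j < seq.length then
    if seq[j] = "N" then pvInnerA seq (n_count + 1) (j + 1)
    else (n_count, j)
  else (n_count, j)
termination_by seq.length - j

-- needed for termination of the outer loop: the inner loop's final j never decreases
lemma pvInnerA_ge (seq : List String) (c : Int) (j : Nat) : j ≤ (pvInnerA seq c j).2 := by
  rw [pvInnerA]
  split
  · split
    · have := pvInnerA_ge seq (c + 1) (j + 1); omega
    · simp
  · simp
termination_by seq.length - j

-- outer while loop over index i
def pvOuterA (seq : List String) (i : Nat) : List (Int × Int) :=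
  if h : i < seq.length then
    if seq[i] = "N" then
      (if (pvInnerA seq 1 (i + 1)).1 ≥ 2 then [((i : Int), (pvInnerA seq 1 (i + 1)).1)] else []) ++
        pvOuterA seq (pvInnerA seq 1 (i + 1)).2
    else
      pvOuterA seq (i + 1)
  else []
termination_by seq.length - i
decreasing_by
  · have := pvInnerA_ge seq 1 (i + 1); omega
  · omega

def find_multiple_n_starts (seq : List String) : List (Int × Int) := pvOuterA seq 0

-- ===== PORT B =====
-- pass 1: ns = [i for i, x in enumerate(seq) if isinstance(x, str) and x == 'N']
def pvNsB (seq : List String) : List Int :=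
  ((PySem.List.enumerate seq).filter (fun p => p.2 == "N")).map (·.1)

-- pass 2 loop body: merge position i into the run it precedes (acc holds runs reversed; acc[-1] is its head)
def pvStepB (acc : List (Int × Int)) (i : Int) : List (Int × Int) :=
  match acc.getLast? with
  | some (s, l) => if s = i + 1 then acc.dropLast ++ [(i, l + 1)] else acc ++ [(i, 1)]
  | none => acc ++ [(i, 1)]

def find_multiple_n_starts_alt (seq : List String) : List (Int × Int) :=
  (((pvNsB seq).reverse.foldl pvStepB []).reverse).filter (fun p => 2 ≤ p.2)

-- ===== PRECONDITION & SPEC =====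
def Spec_find_multiple_n_starts (seq : List String) (out : List (Int × Int)) : Prop := out = find_multiple_n_starts_alt seq
instance (seq : List String) (out : List (Int × Int)) : Decidable (Spec_find_multiple_n_starts seq out) := by unfold Spec_find_multiple_n_starts; infer_instance

-- ===== CLAIM (what is proved, stated in full; the proofs are below) =====
def Claim_equal_find_multiple_n_starts : Prop := ∀ (seq : List String), Dom_find_multiple_n_starts seq → Spec_find_multiple_n_starts seq (find_multiple_n_starts seq)

-- ===== LEMMAS AND PROOFS =====

-- length of the leading run of "N"
def pvNrun (l : List String) : Nat := (l.takeWhile (fun y => y == "N")).length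

-- intermediate list-level form of A's loop
def pvGo : List String → Nat → List (Int × Int)
  | [], _ => []
  | x :: xs, s =>
    if x == "N" then
      (if 2 ≤ 1 + pvNrun xs then [((s : Int), ((1 + pvNrun xs : Nat) : Int))] else []) ++
        pvGo (xs.drop (pvNrun xs)) (s + (1 + pvNrun xs))
    else pvGo xs (s + 1)
termination_by l => l.length
decreasing_by all_goals simp [List.length_drop]

lemma pvNrun_nil : pvNrun [] = 0 := by simp [pvNrun]

lemma pvNrun_cons_N (xs : List String) : pvNrun ("N" :: xs) = 1 + pvNrun xs := by
  simp [pvNrun]; omega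

lemma pvNrun_cons_not (x : String) (xs : List String) (h : ¬ x = "N") : pvNrun (x :: xs) = 0 := by
  simp [pvNrun, h]

lemma pvInnerA_eq (seq : List String) (c : Int) (j : Nat) :
    pvInnerA seq c j = (c + (pvNrun (seq.drop j) : Int), j + pvNrun (seq.drop j)) := by
  rw [pvInnerA]
  split
  · rename_i h
    rw [List.drop_eq_getElem_cons h]
    split
    · rename_i hN
      rw [hN, pvNrun_cons_N, pvInnerA_eq seq (c + 1) (j + 1)]
      refine Prod.ext ?_ ?_
      · push_cast; ring
      · simp; omega
    · rename_i hN
      rw [pvNrun_cons_not _ _ hN]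
      simp
  · rename_i h
    rw [List.drop_eq_nil_of_le (by omega), pvNrun_nil]
    simp
termination_by seq.length - j

lemma pvInnerA_fst (seq : List String) (c : Int) (j : Nat) :
    (pvInnerA seq c j).1 = c + (pvNrun (seq.drop j) : Int) := by rw [pvInnerA_eq]

lemma pvInnerA_snd (seq : List String) (c : Int) (j : Nat) :
    (pvInnerA seq c j).2 = j + pvNrun (seq.drop j) := by rw [pvInnerA_eq]

lemma pvOuterA_eq (seq : List String) (i : Nat) :
    pvOuterA seq i = pvGo (seq.drop i) i := by
  rw [pvOuterA]
  split
  · rename_i h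
    rw [List.drop_eq_getElem_cons h, pvGo]
    by_cases hN : seq[i] = "N"
    · rw [if_pos hN, pvInnerA_fst, pvInnerA_snd, hN,
        if_pos (show (("N" : String) == "N") = true by simp),
        pvOuterA_eq seq (i + 1 + pvNrun (seq.drop (i + 1)))]
      have hm : (seq.drop (i + 1)).drop (pvNrun (seq.drop (i + 1)))
          = seq.drop (i + 1 + pvNrun (seq.drop (i + 1))) := by
        rw [List.drop_drop]; try ring_nf
      rw [hm]
      have hs : i + (1 + pvNrun (seq.drop (i + 1))) = i + 1 + pvNrun (seq.drop (i + 1)) := by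
        omega
      rw [hs]
      congr 1
      by_cases h2 : 2 ≤ 1 + pvNrun (seq.drop (i + 1))
      · rw [if_pos (show (1 : Int) + (pvNrun (seq.drop (i + 1)) : Int) ≥ 2 by omega),
          if_pos h2]
        push_cast
        try ring_nf
      · rw [if_neg (show ¬ (1 : Int) + (pvNrun (seq.drop (i + 1)) : Int) ≥ 2 by omega),
          if_neg h2]
    · rw [if_neg hN, if_neg (by simp [hN])]
      exact pvOuterA_eq seq (i + 1)
  · rename_i h
    rw [List.drop_eq_nil_of_le (by omega), pvGo]
termination_by seq.length - i
decreasing_by all_goals omega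

-- structural (fold-right) form of B's pass-2 grouping
def pvSplit : List Int → List (Int × Int)
  | [] => []
  | i :: is =>
    match pvSplit is with
    | (s, l) :: rest => if s = i + 1 then (i, l + 1) :: rest else (i, 1) :: (s, l) :: rest
    | [] => [(i, 1)]

-- positions of "N" in a list, 0-based
def pvNsOf : List String → List Int
  | [] => []
  | x :: xs => if x == "N" then 0 :: (pvNsOf xs).map (· + 1) else (pvNsOf xs).map (· + 1)

def pvBlock (n : Nat) (t : Int) : List Int := (List.range n).map (fun (k : Nat) => (k : Int) + t)

lemma pvMapAdd (l : List Int) (a b : Int) : (l.map (· + a)).map (· + b) = l.map (· + (a + b)) := by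
  simp only [List.map_map]
  apply List.map_congr_left
  intro x _
  simp [Function.comp]; ring

lemma pvBlock_map_add (n : Nat) (t a : Int) : (pvBlock n t).map (· + a) = pvBlock n (t + a) := by
  simp only [pvBlock, List.map_map]
  apply List.map_congr_left
  intro x _
  simp [Function.comp]; ring

lemma pvBlock_succ (n : Nat) (t : Int) : pvBlock (n + 1) t = t :: pvBlock n (t + 1) := by
  rw [pvBlock, List.range_succ_eq_map, List.map_cons, List.map_map, pvBlock]
  congr 1
  · simp
  · apply List.map_congr_left
    intro x _
    simp [Function.comp]
    ring

lemma pvSplit_cons_of_eq (i : Int) (is : List Int) (s l : Int) (rest : List (Int × Int))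
    (h : pvSplit is = (s, l) :: rest) :
    pvSplit (i :: is) = if s = i + 1 then (i, l + 1) :: rest else (i, 1) :: (s, l) :: rest := by
  rw [pvSplit, h]

lemma pvSplit_cons_of_nil (i : Int) (is : List Int) (h : pvSplit is = []) :
    pvSplit (i :: is) = [(i, 1)] := by
  rw [pvSplit, h]

lemma pvSplit_head (ns : List Int) : (pvSplit ns).head?.map Prod.fst = ns.head? := by
  cases ns with
  | nil => simp [pvSplit]
  | cons i is =>
    rw [pvSplit]
    rcases h : pvSplit is with _ | ⟨⟨s, l⟩, rest⟩ <;> simp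
    split <;> simp

lemma pvSplit_block (n : Nat) (t : Int) (tail : List Int)
    (hn : 1 ≤ n) (ht : ∀ h ∈ tail.head?, h ≠ t + n) :
    pvSplit (pvBlock n t ++ tail) = (t, (n : Int)) :: pvSplit tail := by
  induction n generalizing t with
  | zero => omega
  | succ m ih =>
    rcases Nat.eq_or_lt_of_le hn with h1 | h1
    · -- n = 1
      have hm : m = 0 := by omega
      subst hm
      have h0 : pvBlock 0 (t + 1) = [] := by simp [pvBlock]
      rw [pvBlock_succ, h0, List.cons_append, List.nil_append]
      rcases h : pvSplit tail with _ | ⟨⟨s, l⟩, rest⟩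
      · rw [pvSplit_cons_of_nil _ _ h]
        norm_num
        
      · have hhead := pvSplit_head tail
        rw [h] at hhead
        simp only [List.head?_cons, Option.map_some] at hhead
        have hne : s ≠ t + 1 := by
          have := ht s (by rw [← hhead]; rfl)
          simpa using this
        rw [pvSplit_cons_of_eq _ _ _ _ _ h, if_neg hne]
        norm_num
    · -- n = m+1, m ≥ 1
      have hm : 1 ≤ m := by omega
      have htail' : ∀ h ∈ tail.head?, h ≠ (t + 1) + m := by
        intro h hh
        have := ht h hh
        push_cast at this ⊢
        omega
      have hrec := ih (t + 1) hm htail'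
      rw [pvBlock_succ, List.cons_append, pvSplit_cons_of_eq _ _ _ _ _ hrec, if_pos rfl]
      norm_cast

lemma pvNsOf_nonneg (l : List String) : ∀ i ∈ pvNsOf l, 0 ≤ i := by
  induction l with
  | nil => simp [pvNsOf]
  | cons x xs ih =>
    intro i hi
    rw [pvNsOf] at hi
    split at hi <;> simp only [List.mem_cons, List.mem_map] at hi
    · rcases hi with rfl | ⟨j, hj, rfl⟩
      · omega
      · have := ih j hj; omega
    · rcases hi with ⟨j, hj, rfl⟩
      have := ih j hj; omega

lemma pvDrop_head (xs : List String) (h : String)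
    (hh : (xs.drop (pvNrun xs)).head? = some h) : h ≠ "N" := by
  induction xs with
  | nil => simp at hh
  | cons x xs' ih =>
    by_cases hx : x = "N"
    · subst hx
      rw [pvNrun_cons_N] at hh
      have : (1 + pvNrun xs') = pvNrun xs' + 1 := by omega
      rw [this, List.drop_succ_cons] at hh
      exact ih hh
    · rw [pvNrun_cons_not _ _ hx, List.drop_zero] at hh
      simp at hh
      rw [← hh]; exact hx

lemma pvNsOf_head_pos (l : List String) (hl : ∀ y ∈ l.head?, y ≠ "N") :
    ∀ h ∈ (pvNsOf l).head?, 1 ≤ h := by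
  cases l with
  | nil => simp [pvNsOf]
  | cons y ys =>
    have hy : ¬ y = "N" := by
      have := hl y (by simp)
      simpa using this
    intro h hh
    rw [pvNsOf, if_neg (by simp [hy])] at hh
    simp only [List.head?_map, Option.mem_def, Option.map_eq_some_iff] at hh
    obtain ⟨j, hj, rfl⟩ := hh
    have hjmem : j ∈ pvNsOf ys := by
      cases hns : pvNsOf ys with
      | nil => rw [hns] at hj; simp at hj
      | cons a as =>
        rw [hns] at hj
        simp only [List.head?_cons, Option.some.injEq] at hj
        simp [hj]
    have := pvNsOf_nonneg ys j hjmem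
    omega

lemma pvNsOf_decomp (xs : List String) :
    pvNsOf xs = pvBlock (pvNrun xs) 0 ++ (pvNsOf (xs.drop (pvNrun xs))).map (· + (pvNrun xs : Int)) := by
  induction xs with
  | nil => simp [pvNsOf, pvNrun_nil, pvBlock]
  | cons x xs' ih =>
    by_cases hx : x = "N"
    · subst hx
      rw [pvNrun_cons_N]
      have h1 : 1 + pvNrun xs' = pvNrun xs' + 1 := by omega
      rw [h1, List.drop_succ_cons, pvBlock_succ]
      rw [pvNsOf, if_pos (by simp)]
      rw [ih, List.map_append, pvBlock_map_add, pvMapAdd]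
      simp only [List.cons_append, List.cons.injEq, true_and]
      congr 1
    · rw [pvNrun_cons_not _ _ hx, List.drop_zero, pvBlock]
      simp only [List.range_zero, List.map_nil, List.nil_append]
      rw [pvNsOf, if_neg (by simp [hx])]
      simp

-- main correspondence: A's list-level loop equals split-then-filter over the position list
lemma pvGo_eq (l : List String) (s : Nat) :
    pvGo l s = (pvSplit ((pvNsOf l).map (· + (s : Int)))).filter (fun p => 2 ≤ p.2) := by
  match l with
  | [] => simp [pvGo, pvNsOf, pvSplit]
  | x :: xs =>
    rw [pvGo]
    by_cases hx : x = "N"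
    · subst hx
      rw [if_pos (by simp)]
      generalize hr : pvNrun xs = r
      have hlist : (pvNsOf ("N" :: xs)).map (· + (s : Int))
          = pvBlock (r + 1) (s : Int)
            ++ (pvNsOf (xs.drop r)).map (· + ((r : Int) + (s : Int) + 1)) := by
        rw [pvNsOf, if_pos (by simp)]
        simp only [List.map_cons, pvMapAdd]
        rw [pvBlock_succ, List.cons_append]
        congr 1
        · simp
        · conv_lhs => rw [pvNsOf_decomp xs, hr]
          rw [List.map_append, pvBlock_map_add, pvMapAdd]
          congr 1
          · congr 1; ring
          · apply List.map_congr_left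
            intro k _
            ring
      have htail : ∀ h ∈ ((pvNsOf (xs.drop r)).map (· + ((r : Int) + (s : Int) + 1))).head?,
          h ≠ (s : Int) + ((r + 1 : Nat) : Int) := by
        intro h hh
        simp only [List.head?_map, Option.mem_def, Option.map_eq_some_iff] at hh
        obtain ⟨j, hj, rfl⟩ := hh
        have hj1 : 1 ≤ j := by
          refine pvNsOf_head_pos (xs.drop r) ?_ j (by simp [Option.mem_def, hj])
          intro y hy
          rw [← hr] at hy
          exact pvDrop_head xs y (Option.mem_def.mp hy)
        push_cast
        omega
      rw [hlist, pvSplit_block (r + 1) (s : Int) _ (by omega) htail]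
      rw [List.filter_cons]
      have hrec := pvGo_eq (xs.drop r) (s + (1 + r))
      have hcast : ((s + (1 + r) : Nat) : Int) = (r : Int) + (s : Int) + 1 := by
        push_cast; ring
      rw [hcast] at hrec
      by_cases h2 : 2 ≤ 1 + r
      · rw [if_pos h2]
        rw [if_pos (by simp; omega)]
        rw [hrec]
        simp only [List.cons_append, List.nil_append]
        have hc : ((1 + r : Nat) : Int) = ((r + 1 : Nat) : Int) := by push_cast; ring
        rw [hc]
      · have hr0 : r = 0 := by omega
        subst hr0
        rw [if_neg h2, if_neg (by norm_num)]
        rw [hrec, List.nil_append]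
    · rw [if_neg (by simp [hx])]
      rw [pvNsOf, if_neg (by simp [hx]), pvMapAdd]
      have hm : (pvNsOf xs).map (· + (1 + (s : Int))) = (pvNsOf xs).map (· + ((s + 1 : Nat) : Int)) := by
        apply List.map_congr_left
        intro k _
        push_cast; ring
      rw [hm, pvGo_eq xs (s + 1)]
termination_by l.length
decreasing_by all_goals simp [List.length_drop]

-- B's backward accumulator loop computes pvSplit (reversed)
lemma pvFoldB_eq (ns : List Int) : ns.reverse.foldl pvStepB [] = (pvSplit ns).reverse := by
  induction ns with
  | nil => simp [pvSplit]
  | cons i is ih =>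
    rw [List.reverse_cons, List.foldl_append, ih, List.foldl_cons, List.foldl_nil]
    rcases h : pvSplit is with _ | ⟨⟨s, l⟩, rest⟩
    · rw [pvSplit_cons_of_nil _ _ h]
      simp [pvStepB]
    · rw [pvSplit_cons_of_eq _ _ _ _ _ h]
      have hlast : (((s, l) :: rest).reverse).getLast? = some (s, l) := by
        simp [List.getLast?_reverse]
      simp only [pvStepB, hlast]
      by_cases hsi : s = i + 1
      · simp [hsi]
      · simp [hsi, List.reverse_cons]

-- enumerate-based pass 1 equals pvNsOf shifted by the start
lemma pvNsB_eq (seq : List String) (s : Int) :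
    ((PySem.List.enumerate seq s).filter (fun p => p.2 == "N")).map (·.1)
      = (pvNsOf seq).map (· + s) := by
  induction seq generalizing s with
  | nil => simp [PySem.List.enumerate_nil, pvNsOf]
  | cons x xs ih =>
    rw [PySem.List.enumerate_cons, pvNsOf]
    by_cases hx : x = "N"
    · subst hx
      rw [if_pos (by simp)]
      rw [List.filter_cons, if_pos (by simp)]
      simp only [List.map_cons, pvMapAdd]
      rw [ih (s + 1)]
      simp [Int.add_comm]
    · rw [if_neg (by simp [hx])]
      rw [List.filter_cons, if_neg (by simp [hx])]
      rw [ih (s + 1), pvMapAdd]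
      apply List.map_congr_left
      intro k _
      ring

-- ===== VERDICT (by name: the statement is the Claim_ definition above) =====
theorem find_multiple_n_starts_spec : Claim_equal_find_multiple_n_starts := by
  intro seq _
  unfold Spec_find_multiple_n_starts find_multiple_n_starts find_multiple_n_starts_alt
  rw [pvOuterA_eq, List.drop_zero, pvGo_eq]
  rw [pvNsB, pvNsB_eq seq 0, pvFoldB_eq, List.reverse_reverse]
  norm_num
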